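-- pv_equiv track=rewrite | github.com/kteja95/CSPP1 | cspp1-assignments/m18exam4final/Check Sudoku/check_sudoku.py | checkduplicatess
-- ===== SOURCE A (Python) =====
-- def checkduplicatess(nineGrouping):
--     uniqueDigits = set()
--     for num in nineGrouping:
--       if num != 0:
--         if num  in uniqueDigits:
--           return False
--       uniqueDigits.add(num)
--     return True
-- ===== SOURCE B (Python) =====
-- def checkduplicatess(nineGrouping):
--     nz = [x for x in nineGrouping if x != 0]
--     return len(nz) == len(set(nz))
-- ===== Notes on version B (the rewrite author's own statement) =====
-- stated objective: simpler
-- what changed: Replaces the incremental set-membership loop with early exit by building the nonzero sublist once and comparing its length with the length of its deduplication.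
import Mathlib
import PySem

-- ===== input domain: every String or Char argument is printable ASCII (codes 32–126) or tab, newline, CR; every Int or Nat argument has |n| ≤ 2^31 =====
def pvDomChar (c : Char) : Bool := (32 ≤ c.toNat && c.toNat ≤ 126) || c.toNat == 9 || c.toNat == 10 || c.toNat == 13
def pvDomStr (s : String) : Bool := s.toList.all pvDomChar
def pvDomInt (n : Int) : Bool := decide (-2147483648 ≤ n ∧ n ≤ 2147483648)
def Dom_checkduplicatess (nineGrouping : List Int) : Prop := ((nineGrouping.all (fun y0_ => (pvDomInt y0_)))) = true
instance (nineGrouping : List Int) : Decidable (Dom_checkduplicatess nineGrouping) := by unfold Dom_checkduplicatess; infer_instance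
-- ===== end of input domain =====

-- B builds the nonzero sublist once and compares its length with its set's size, instead of A's incremental membership loop.


-- ===== PORT A =====
-- the loop with the growing 'uniqueDigits' set and early 'return False'
def checkAuxA : List Int → PySem.Set Int → Bool
  | [], _ => true
  | n :: t, s =>
    if n ≠ 0 ∧ PySem.Set.contains s n then false
    else checkAuxA t (PySem.Set.add s n)

def checkduplicatess (nineGrouping : List Int) : Bool :=
  checkAuxA nineGrouping PySem.Set.empty

-- ===== PORT B =====
def checkduplicatess_alt (nineGrouping : List Int) : Bool :=
  let nz := nineGrouping.filter (fun x => x ≠ 0)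
  decide ((nz.length : Int) = ((PySem.Set.ofList nz).length : Int))

-- ===== PRECONDITION & SPEC =====
def Spec_checkduplicatess (nineGrouping : List Int) (out : Bool) : Prop := out = checkduplicatess_alt nineGrouping
instance (nineGrouping : List Int) (out : Bool) : Decidable (Spec_checkduplicatess nineGrouping out) := by unfold Spec_checkduplicatess; infer_instance

-- ===== CLAIM (what is proved, stated in full; the proofs are below) =====
def Claim_equal_checkduplicatess : Prop := ∀ (nineGrouping : List Int), Dom_checkduplicatess nineGrouping → Spec_checkduplicatess nineGrouping (checkduplicatess nineGrouping)

-- ===== LEMMAS AND PROOFS =====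

-- A's loop returns true iff the nonzero entries are pairwise distinct and none is already in s
theorem checkAuxA_iff (xs : List Int) (s : PySem.Set Int) :
    checkAuxA xs s = true ↔
      ((xs.filter (fun x => x ≠ 0)).Nodup ∧ ∀ x ∈ xs, x ≠ 0 → x ∉ s) := by
  induction xs generalizing s with
  | nil => simp [checkAuxA]
  | cons n t ih =>
    have hadd : ∀ x : Int, x ∈ PySem.Set.add s n ↔ x ∈ s ∨ x = n :=
      fun x => PySem.Set.mem_add s n x
    by_cases hc : n ≠ 0 ∧ PySem.Set.contains s n = true
    · have h : n ≠ 0 ∧ n ∈ s :=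
        ⟨hc.1, by have := hc.2; rw [PySem.Set.contains_iff] at this; exact this⟩
      simp only [checkAuxA]
      rw [if_pos hc]
      constructor
      · intro hf; cases hf
      · rintro ⟨_, h2⟩
        exact (h2 n List.mem_cons_self h.1 h.2).elim
    · have h : n ≠ 0 → n ∉ s :=
        fun h0 hm => hc ⟨h0, by rw [PySem.Set.contains_iff]; exact hm⟩
      simp only [checkAuxA]
      rw [if_neg hc, ih]
      by_cases hn : n = 0
      · subst hn
        simp only [List.filter_cons, ne_eq, not_true_eq_false, decide_false,
          Bool.false_eq_true, if_false, List.mem_cons]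
        constructor
        · rintro ⟨h1, h2⟩
          refine ⟨h1, ?_⟩
          rintro x (rfl | hx) hx0
          · exact absurd rfl hx0
          · have := h2 x hx hx0
            rw [hadd] at this
            tauto
        · rintro ⟨h1, h2⟩
          refine ⟨h1, ?_⟩
          intro x hx hx0
          rw [hadd]
          push Not
          exact ⟨h2 x (Or.inr hx) hx0, hx0⟩
      · have hns : n ∉ s := h hn
        simp only [List.filter_cons, ne_eq, hn, not_false_eq_true, decide_true, if_true,
          List.nodup_cons, List.mem_filter, List.mem_cons]
        constructor
        · rintro ⟨h1, h2⟩
          have hmem : n ∉ t ∨ False := by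
            by_cases hnt : n ∈ t
            · have := h2 n hnt hn
              rw [hadd] at this
              tauto
            · exact Or.inl hnt
          refine ⟨⟨fun hc => ?_, h1⟩, ?_⟩
          · rcases hmem with hm | hf
            · exact hm hc.1
            · exact hf
          · rintro x (rfl | hx) hx0
            · exact hns
            · have := h2 x hx hx0
              rw [hadd] at this
              tauto
        · rintro ⟨⟨h0, h1⟩, h2⟩
          refine ⟨h1, ?_⟩
          intro x hx hx0
          rw [hadd]
          push Not
          refine ⟨h2 x (Or.inr hx) hx0, fun hxn => h0 ?_⟩
          subst hxn
          exact ⟨hx, by simp⟩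

-- set(nz) has the same length as nz exactly when nz has no duplicates
theorem length_ofList_eq_iff (xs : List Int) :
    (PySem.Set.ofList xs).length = xs.length ↔ xs.Nodup := by
  induction xs with
  | nil => simp [PySem.Set.ofList_nil]
  | cons x t ih =>
    rw [PySem.Set.ofList_cons]
    by_cases hx : x ∈ t
    · have hx' : x ∈ PySem.Set.ofList t := (PySem.Set.mem_ofList t x).mpr hx
      have hlt : (PySem.Set.discard (PySem.Set.ofList t) x).length < (PySem.Set.ofList t).length := by
        simp only [PySem.Set.discard]
        exact List.length_filter_lt_length_iff_exists.mpr ⟨x, hx', by simp⟩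
      have hle := PySem.Set.length_ofList_le (xs := t)
      simp only [List.length_cons]
      constructor
      · intro h; omega
      · intro h; exact absurd hx (List.nodup_cons.mp h).1
    · have hx' : x ∉ PySem.Set.ofList t := fun hm => hx ((PySem.Set.mem_ofList t x).mp hm)
      have hdx : PySem.Set.discard (PySem.Set.ofList t) x = PySem.Set.ofList t := by
        simp only [PySem.Set.discard]
        refine List.filter_eq_self.mpr (fun a ha => ?_)
        have : a ≠ x := fun he => hx' (he ▸ ha)
        simp [this]
      rw [hdx]
      simp only [List.length_cons, Nat.add_left_inj, ih, List.nodup_cons]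
      tauto

-- ===== VERDICT (by name: the statement is the Claim_ definition above) =====
theorem checkduplicatess_spec : Claim_equal_checkduplicatess := by
  intro xs _
  unfold Spec_checkduplicatess checkduplicatess checkduplicatess_alt
  rw [Bool.eq_iff_iff]
  rw [checkAuxA_iff]
  simp only [decide_eq_true_eq, Int.natCast_inj]
  rw [eq_comm, length_ofList_eq_iff]
  constructor
  · rintro ⟨h1, _⟩; exact h1
  · intro h
    exact ⟨h, fun x _ _ hx => by simp [PySem.Set.empty] at hx⟩
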